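-- pv_equiv track=rewrite | github.com/satemochi/saaaaah | approximation_algorithms/chapter_02/2.4 TSP/draw_4tours.py | incomming_constraints
-- ===== SOURCE A (Python) =====
-- def incomming_constraints(n):
--     N = n**2
--     for j in range(n):
--         const_vector = [0] * (N + n)
--         for i in range(n):
--             if i == j:
--                 continue
--             const_vector[n * i + j] = 1
--         yield const_vector
-- ===== SOURCE B (Python) =====
-- def incomming_constraints(n):
--     # One flat pass: the value at each of the N+n positions is derived from a
--     # positional predicate (inside the N-block, column == j, row != j) -- no
--     # zero vector is allocated and no cell is scatter-written.
--     N = n * n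
--     for j in range(n):
--         yield [1 if (idx < N and idx % n == j and idx // n != j) else 0
--                for idx in range(N + n)]
-- ===== Notes on version B (the rewrite author's own statement) =====
-- stated objective: alternative
-- what changed: B derives every entry of the length-(n^2+n) row in one flat comprehension from a positional predicate (idx < n^2 and idx % n == j and idx // n != j), instead of allocating a zero row and scatter-writing the n ones at indices n*i+j.
import Mathlib
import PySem

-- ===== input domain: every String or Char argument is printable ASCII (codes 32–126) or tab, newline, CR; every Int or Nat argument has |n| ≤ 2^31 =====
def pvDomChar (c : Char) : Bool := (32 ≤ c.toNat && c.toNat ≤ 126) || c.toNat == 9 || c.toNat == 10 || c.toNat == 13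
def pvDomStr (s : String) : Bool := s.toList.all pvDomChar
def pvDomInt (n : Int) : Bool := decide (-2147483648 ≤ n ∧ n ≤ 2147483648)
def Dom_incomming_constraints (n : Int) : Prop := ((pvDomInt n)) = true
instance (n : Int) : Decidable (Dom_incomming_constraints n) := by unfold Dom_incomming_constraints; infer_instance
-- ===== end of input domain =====

-- B computes each entry of the length-(n^2+n) row in one flat scan from a positional predicate
-- (idx < n^2, idx % n == j, idx // n != j) instead of zero-filling and scatter-writing the ones
-- (objective: alternative).

-- ===== PORT A =====
def incomming_constraints (n : Int) : List (List Int) :=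
  let N := n ^ 2
  (PySem.List.pyRange 0 n 1).map (fun j =>
    (PySem.List.pyRange 0 n 1).foldl
      (fun v i => if i == j then v else PySem.List.pySetD v (n * i + j) 1)
      (List.replicate (N + n).toNat (0 : Int)))

-- ===== PORT B =====
def incomming_constraints_alt (n : Int) : List (List Int) :=
  let N := n * n
  (PySem.List.pyRange 0 n 1).map (fun j =>
    (PySem.List.pyRange 0 (N + n) 1).map (fun idx =>
      if idx < N ∧ PySem.Int.mod idx n = j ∧ PySem.Int.floordiv idx n ≠ j
      then (1 : Int) else 0))

-- ===== PRECONDITION & SPEC =====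
def Spec_incomming_constraints (n : Int) (out : List (List Int)) : Prop := out = incomming_constraints_alt n
instance (n : Int) (out : List (List Int)) : Decidable (Spec_incomming_constraints n out) := by unfold Spec_incomming_constraints; infer_instance

-- ===== CLAIM (what is proved, stated in full; the proofs are below) =====
def Claim_equal_incomming_constraints : Prop := ∀ (n : Int), Dom_incomming_constraints n → Spec_incomming_constraints n (incomming_constraints n)

-- ===== LEMMAS AND PROOFS =====

-- the block occupying row-slots [n*i, n*i+n) of constraint j: a unit column block off the
-- diagonal, an all-zero block on it
def pvBlk (n j i : Int) : List Int :=
  if i == j then List.replicate n.toNat (0 : Int)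
  else (PySem.List.pyRange 0 n 1).map (fun c => if c == j then (1 : Int) else 0)

lemma pvBlk_length (n j i : Int) : (pvBlk n j i).length = n.toNat := by
  unfold pvBlk; split <;> simp [PySem.List.length_pyRange_one]

lemma pvRange_zero_cast (nn : Nat) :
    PySem.List.pyRange 0 (nn : Int) 1 = (List.range nn).map (fun k : Nat => (k : Int)) := by
  have h : (((nn : Int) - 0)).toNat = nn := by omega
  rw [PySem.List.pyRange_one, h]
  apply List.map_congr_left
  intro a _
  omega

-- setting the single 1 into a zero block gives the unit block
lemma set_replicate_unit (nn jn : Nat) (_hj : jn < nn) :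
    (List.replicate nn (0 : Int)).set jn 1
      = (PySem.List.pyRange 0 (nn : Int) 1).map (fun c => if c == (jn : Int) then (1 : Int) else 0) := by
  rw [pvRange_zero_cast, List.map_map]
  apply List.ext_getElem
  · simp
  · intro k h1 h2
    rw [List.getElem_map, List.getElem_range, List.getElem_set]
    by_cases hk : jn = k
    · simp [hk]
    · have hne : ¬ ((k : Int) = (jn : Int)) := fun h => hk (Nat.cast_injective h).symm
      simp [hk, Function.comp, hne]

-- loop invariant for A's inner scatter loop: after m iterations the vector is the first m blocks
-- followed by zeros
lemma A_inner_invariant (nn jn : Nat) (hj : jn < nn) (m : Nat) (hm : m ≤ nn) :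
    ((List.range m).map (fun k : Nat => (k : Int))).foldl
        (fun v i => if i == (jn : Int) then v else PySem.List.pySetD v ((nn : Int) * i + jn) 1)
        (List.replicate (nn * nn + nn) (0 : Int))
      = ((List.range m).map (fun k : Nat => (k : Int))).flatMap (pvBlk nn jn)
        ++ List.replicate (nn * nn + nn - m * nn) (0 : Int) := by
  induction m with
  | zero => simp
  | succ m ih =>
    have hm' : m ≤ nn := Nat.le_of_succ_le hm
    have hmlt : m < nn := hm
    rw [List.range_succ, List.map_append, List.foldl_append, ih hm', List.flatMap_append]
    simp only [List.map_cons, List.map_nil, List.foldl_cons, List.foldl_nil,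
      List.flatMap_cons, List.flatMap_nil, List.append_nil]
    set P := ((List.range m).map (fun k : Nat => (k : Int))).flatMap (pvBlk nn jn) with hP
    have hlen : P.length = m * nn := by
      rw [hP, List.length_flatMap]
      simp [pvBlk_length, Function.comp_def, List.map_const', List.sum_replicate,
        smul_eq_mul, Nat.mul_comm]
    have hsplit : nn * nn + nn - m * nn = nn + (nn * nn + nn - (m + 1) * nn) := by
      have h1 : (m + 1) * nn ≤ nn * nn := by
        have := Nat.mul_le_mul_right nn (Nat.succ_le_of_lt hmlt)
        simpa using this
      have h2 : (m + 1) * nn = m * nn + nn := by ring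
      omega
    by_cases hcase : (m : Int) = (jn : Int)
    · have hbeq : ((m : Int) == (jn : Int)) = true := by simpa using hcase
      rw [hbeq, if_pos rfl, hsplit, List.replicate_add, ← List.append_assoc]
      congr 1
      congr 1
      simp [pvBlk, hbeq]
    · have hbeq : ((m : Int) == (jn : Int)) = false := by simpa using hcase
      rw [hbeq]
      simp only [Bool.false_eq_true, if_false]
      have hidx : (0 : Int) ≤ (nn : Int) * (m : Int) + (jn : Int) := by positivity
      rw [PySem.List.pySetD_of_nonneg _ _ hidx]
      have htn : ((nn : Int) * (m : Int) + (jn : Int)).toNat = m * nn + jn := by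
        have h : (nn : Int) * (m : Int) + (jn : Int) = ((m * nn + jn : Nat) : Int) := by
          push_cast; ring
        rw [h, Int.toNat_natCast]
      rw [htn, List.set_append_right (m * nn + jn) 1 (by rw [hlen]; omega), hlen]
      have hsub : m * nn + jn - m * nn = jn := by omega
      rw [hsub, hsplit, List.replicate_add,
        List.set_append_left jn 1 (by simpa using hj),
        set_replicate_unit nn jn hj, ← List.append_assoc]
      congr 1
      congr 1
      simp [pvBlk, hbeq]

lemma toNat_sq_add (nn : Nat) : (((nn : Int) ^ 2 + (nn : Int))).toNat = nn * nn + nn := by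
  have h : ((nn : Int) ^ 2 + (nn : Int)) = ((nn * nn + nn : Nat) : Int) := by push_cast; ring
  rw [h, Int.toNat_natCast]

-- B's flat predicate value at position k of constraint j
def pvGVal (nn jn k : Nat) : Int :=
  if (k : Int) < (nn : Int) * (nn : Int)
       ∧ PySem.Int.mod (k : Int) (nn : Int) = (jn : Int)
       ∧ PySem.Int.floordiv (k : Int) (nn : Int) ≠ (jn : Int)
  then 1 else 0

-- B's flat scan over the first m*nn positions reproduces the first m blocks
lemma B_flat_invariant (nn jn : Nat) (m : Nat) (hm : m ≤ nn) :
    (List.range (m * nn)).map (pvGVal nn jn)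
      = ((List.range m).map (fun k : Nat => (k : Int))).flatMap (pvBlk nn jn) := by
  induction m with
  | zero => simp
  | succ m ih =>
    have hm' : m ≤ nn := Nat.le_of_succ_le hm
    have hmlt : m < nn := hm
    have hsucc : (m + 1) * nn = m * nn + nn := by ring
    rw [hsucc, List.range_add, List.map_append, List.map_map,
      List.range_succ, List.map_append, List.flatMap_append, ih hm']
    simp only [Function.comp_def]
    congr 1
    simp only [List.map_cons, List.map_nil, List.flatMap_cons, List.flatMap_nil,
      List.append_nil]
    unfold pvBlk
    have hblock : ∀ c ∈ List.range nn,
        pvGVal nn jn (m * nn + c)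
          = (if (m : Int) = (jn : Int) then (0 : Int)
             else if (c : Int) = (jn : Int) then 1 else 0) := by
      intro c hc
      rw [List.mem_range] at hc
      have hcast : ((m * nn + c : Nat) : Int) = (nn : Int) * (m : Int) + (c : Int) := by
        push_cast; ring
      have hmod : PySem.Int.mod ((m * nn + c : Nat) : Int) (nn : Int) = ((c : Int)) := by
        rw [PySem.Int.mod_natCast]
        have : (m * nn + c) % nn = c := by
          simp [Nat.add_mod, Nat.mul_mod_left, Nat.mod_eq_of_lt hc]
        rw [this]
      have hdiv : PySem.Int.floordiv ((m * nn + c : Nat) : Int) (nn : Int) = ((m : Int)) := by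
        rw [PySem.Int.floordiv_natCast]
        have : (m * nn + c) / nn = m := by
          rw [Nat.mul_comm m nn, Nat.mul_add_div (by omega), Nat.div_eq_of_lt hc]
          omega
        rw [this]
      have hlt : ((m * nn + c : Nat) : Int) < (nn : Int) * (nn : Int) := by
        have : m * nn + c < nn * nn := by nlinarith
        exact_mod_cast this
      unfold pvGVal
      rw [hmod, hdiv]
      by_cases hmj : (m : Int) = (jn : Int)
      · rw [if_pos hmj, if_neg (fun h => h.2.2 hmj)]
      · by_cases hcj : (c : Int) = (jn : Int)
        · rw [if_neg hmj, if_pos hcj, if_pos ⟨hlt, hcj, hmj⟩]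
        · rw [if_neg hmj, if_neg hcj, if_neg (fun h => hcj h.2.1)]
    by_cases hmj : (m : Int) = (jn : Int)
    · have hbeq : ((m : Int) == (jn : Int)) = true := by simpa using hmj
      rw [if_pos hbeq]
      calc (List.range nn).map (fun c => pvGVal nn jn (m * nn + c))
          = (List.range nn).map (fun _ => (0 : Int)) := by
            apply List.map_congr_left
            intro c hc
            rw [hblock c hc, if_pos hmj]
        _ = List.replicate nn (0 : Int) := by simp [List.map_const']
    · have hbeq : ((m : Int) == (jn : Int)) = false := by simpa using hmj
      rw [if_neg (by simp [hbeq]), pvRange_zero_cast, List.map_map]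
      simp only [Function.comp_def]
      apply List.map_congr_left
      intro c hc
      rw [hblock c hc, if_neg hmj]
      simp

-- ===== VERDICT (by name: the statement is the Claim_ definition above) =====
theorem incomming_constraints_spec : Claim_equal_incomming_constraints := by
  intro n _
  unfold Spec_incomming_constraints
  by_cases hn : 0 < n
  · obtain ⟨nn, rfl⟩ : ∃ nn : Nat, n = (nn : Int) := ⟨n.toNat, (Int.toNat_of_nonneg hn.le).symm⟩
    simp only [incomming_constraints, incomming_constraints_alt]
    apply List.map_congr_left
    intro j hj
    rw [PySem.List.mem_pyRange_one] at hj
    obtain ⟨jn, rfl⟩ : ∃ jn : Nat, j = (jn : Int) := ⟨j.toNat, (Int.toNat_of_nonneg hj.1).symm⟩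
    have hjn : jn < nn := by exact_mod_cast hj.2
    rw [toNat_sq_add]
    rw [show PySem.List.pyRange 0 (nn : Int) 1 = (List.range nn).map (fun k : Nat => (k : Int)) from
      pvRange_zero_cast nn]
    rw [A_inner_invariant nn jn hjn nn le_rfl]
    have hr : nn * nn + nn - nn * nn = nn := by omega
    rw [hr]
    -- now rewrite B's flat map into blocks ++ zero tail
    have hcast : (nn : Int) * (nn : Int) + (nn : Int) = ((nn * nn + nn : Nat) : Int) := by
      push_cast; ring
    rw [hcast, pvRange_zero_cast (nn * nn + nn), List.map_map]
    have hGV : ((fun idx : Int =>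
          if idx < (nn : Int) * (nn : Int)
               ∧ PySem.Int.mod idx (nn : Int) = (jn : Int)
               ∧ PySem.Int.floordiv idx (nn : Int) ≠ (jn : Int)
          then (1 : Int) else 0) ∘ (fun k : Nat => (k : Int))) = pvGVal nn jn := by
      funext k
      simp [Function.comp, pvGVal]
    rw [hGV]
    rw [List.range_add, List.map_append, List.map_map, B_flat_invariant nn jn nn le_rfl]
    simp only [Function.comp_def]
    congr 1
    -- the tail: positions ≥ nn*nn are all zero
    have htail : (List.range nn).map (fun c => pvGVal nn jn (nn * nn + c))
        = List.replicate nn (0 : Int) := by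
      calc (List.range nn).map (fun c => pvGVal nn jn (nn * nn + c))
          = (List.range nn).map (fun _ => (0 : Int)) := by
            apply List.map_congr_left
            intro c _
            unfold pvGVal
            rw [if_neg]
            intro h
            have := h.1
            omega
        _ = List.replicate nn (0 : Int) := by simp [List.map_const']
    exact htail.symm
  · have he : PySem.List.pyRange 0 n 1 = [] := by
      rw [PySem.List.pyRange_one]
      have h0 : (n - 0).toNat = 0 := by omega
      rw [h0]
      simp
    simp [incomming_constraints, incomming_constraints_alt, he]
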